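-- pv_equiv track=rewrite | github.com/yishus/riddles | google-foobar/level_2/en_route_salute/solution.py | solution
-- ===== SOURCE A (Python) =====
-- def solution(s):
--     persons = 0
--     count = 0
--     for c in s:
--         if c == ">":
--             persons += 1
--         if c == "<":
--             count += persons
--
--     return count*2
-- ===== SOURCE B (Python) =====
-- def solution(s):
--     chars = list(s)
--     total = 0
--     for i, c in enumerate(chars):
--         if c == '>':
--             total += chars[i+1:].count('<')
--     return 2 * total
-- ===== Notes on version B (the rewrite author's own statement) =====
-- stated objective: alternative
-- what changed: B counts crossing pairs directly: for each '>' at index i it adds the number of '<' in the suffix s[i+1:], instead of A's single pass with a running count of '>' seen so far.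
import Mathlib
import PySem

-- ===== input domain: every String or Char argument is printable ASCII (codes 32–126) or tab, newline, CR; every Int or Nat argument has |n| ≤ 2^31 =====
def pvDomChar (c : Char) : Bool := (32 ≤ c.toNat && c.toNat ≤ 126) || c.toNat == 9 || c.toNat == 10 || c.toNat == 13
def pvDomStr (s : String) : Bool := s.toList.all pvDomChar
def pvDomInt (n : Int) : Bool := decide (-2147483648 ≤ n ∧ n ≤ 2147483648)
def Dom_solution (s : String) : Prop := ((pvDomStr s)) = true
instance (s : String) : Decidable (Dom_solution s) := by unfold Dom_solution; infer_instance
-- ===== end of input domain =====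

-- B counts crossing pairs directly (for each '>' the '<' after it); A keeps a running counter. Same value, different decomposition.

-- ===== PORT A =====
-- running accumulator pass: persons = '>' seen so far, count += persons at each '<'
def solution (s : String) : Int :=
  (s.toList.foldl (fun (st : Int × Int) c =>
    let st1 := if c = '>' then (st.1 + 1, st.2) else st
    if c = '<' then (st1.1, st1.2 + st1.1) else st1) (0, 0)).2 * 2

-- ===== PORT B =====
-- for each index i with chars[i] = '>', add the count of '<' in chars[i+1:]
def solution_alt (s : String) : Int :=
  2 * (PySem.List.enumerate s.toList 0).foldl
    (fun (t : Int) p =>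
      if p.2 = '>' then
        t + (PySem.List.count (PySem.List.slice s.toList (some (p.1 + 1)) none) '<' : Int)
      else t) 0

-- ===== PRECONDITION & SPEC =====
def Spec_solution (s : String) (out : Int) : Prop := out = solution_alt s
instance (s : String) (out : Int) : Decidable (Spec_solution s out) := by unfold Spec_solution; infer_instance

-- ===== CLAIM (what is proved, stated in full; the proofs are below) =====
def Claim_equal_solution : Prop := ∀ (s : String), Dom_solution s → Spec_solution s (solution s)

-- ===== LEMMAS AND PROOFS =====

-- the common value: sum over '>' positions of the number of '<' after them
def crossSum : List Char → Int
  | [] => 0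
  | c :: t => (if c = '>' then (t.count '<' : Int) else 0) + crossSum t

lemma foldA_snd (l : List Char) (p cnt : Int) :
    (l.foldl (fun (st : Int × Int) c =>
      let st1 := if c = '>' then (st.1 + 1, st.2) else st
      if c = '<' then (st1.1, st1.2 + st1.1) else st1) (p, cnt)).2
      = cnt + p * (l.count '<' : Int) + crossSum l := by
  induction l generalizing p cnt with
  | nil => simp [crossSum]
  | cons c t ih =>
    by_cases h1 : c = '>'
    · subst h1
      simp [List.foldl_cons, crossSum, ih]
      ring
    · by_cases h2 : c = '<'
      · subst h2
        simp [List.foldl_cons, crossSum, ih, h1]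
        ring
      · simp [List.foldl_cons, crossSum, ih, h1, h2]

lemma foldB_gen (pre l : List Char) (t : Int) :
    (PySem.List.enumerate l (pre.length : Int)).foldl
      (fun (t : Int) p =>
        if p.2 = '>' then
          t + (PySem.List.count (PySem.List.slice (pre ++ l) (some (p.1 + 1)) none) '<' : Int)
        else t) t
      = t + crossSum l := by
  induction l generalizing pre t with
  | nil => simp [PySem.List.enumerate_nil, crossSum]
  | cons c rest ih =>
    have hcast : ((pre.length : Int) + 1) = ((pre.length + 1 : Nat) : Int) := by push_cast; ring
    have hslice : PySem.List.slice (pre ++ c :: rest) (some ((pre.length : Int) + 1)) none = rest := by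
      rw [hcast, PySem.List.slice_from_natCast,
        show pre ++ c :: rest = (pre ++ [c]) ++ rest by simp,
        show pre.length + 1 = (pre ++ [c]).length by simp]
      exact List.drop_left
    have hstep : ∀ t' : Int,
        (PySem.List.enumerate rest ((pre.length : Int) + 1)).foldl
          (fun (t : Int) p =>
            if p.2 = '>' then
              t + (PySem.List.count (PySem.List.slice (pre ++ c :: rest) (some (p.1 + 1)) none) '<' : Int)
            else t) t'
          = t' + crossSum rest := by
      intro t'
      have h1 : ((pre ++ [c]).length : Int) = (pre.length : Int) + 1 := by simp
      have h2 : (pre ++ [c]) ++ rest = pre ++ c :: rest := by simp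
      have := ih (pre ++ [c]) t'
      rw [h1, h2] at this
      exact this
    rw [PySem.List.enumerate_cons, List.foldl_cons, hstep]
    by_cases h : c = '>'
    · rw [if_pos (by simp [h]), hslice]
      simp only [crossSum, if_pos h, PySem.List.count_eq]
      ring
    · rw [if_neg (by simp [h])]
      simp only [crossSum, if_neg h]
      ring

-- ===== VERDICT (by name: the statement is the Claim_ definition above) =====
theorem solution_spec : Claim_equal_solution := by
  intro s _
  unfold Spec_solution solution solution_alt
  have hB := foldB_gen [] s.toList 0
  simp only [List.length_nil, Int.natCast_zero, List.nil_append] at hB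
  rw [hB, foldA_snd]
  ring
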